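-- pv_equiv track=rewrite | github.com/sw1029/nf | modules/nf_workers/runner.py | _extract_entity_mentions
-- ===== SOURCE A (Python) =====
-- def _extract_entity_mentions(
--     spans: list[tuple[int, int, str]],
--     alias_index: dict[str, set[str]],
-- ) -> list[tuple[str, int, int]]:
--     mentions: list[tuple[str, int, int]] = []
--     for span_start, span_end, segment in spans:
--         matched: set[str] = set()
--         for alias_text, entity_ids in alias_index.items():
--             if not alias_text or alias_text not in segment:
--                 continue
--             if len(entity_ids) == 1:
--                 matched.update(entity_ids)
--         for entity_id in matched:
--             mentions.append((entity_id, span_start, span_end))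
--     return mentions
-- ===== SOURCE B (Python) =====
-- def _extract_entity_mentions(
--     spans: list[tuple[int, int, str]],
--     alias_index: dict[str, set[str]],
-- ) -> list[tuple[str, int, int]]:
--     # Dictionary matching by window lookup: hash-index the singleton aliases once,
--     # then slide windows of each alias length over every segment and look them up,
--     # instead of substring-searching every alias in every segment.
--     singles: dict[str, str] = {}
--     for alias, ids in alias_index.items():
--         if alias and len(ids) == 1:
--             singles[alias] = next(iter(ids))
--     lengths = sorted({len(a) for a in singles})
--     mentions: list[tuple[str, int, int]] = []
--     for start, end, seg in spans:
--         n = len(seg)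
--         found: dict[str, None] = {}
--         for i in range(n):
--             for L in lengths:
--                 if i + L <= n:
--                     eid = singles.get(seg[i:i + L])
--                     if eid is not None:
--                         found[eid] = None
--         mentions.extend((eid, start, end) for eid in found)
--     return mentions
-- ===== Notes on version B (the rewrite author's own statement) =====
-- stated objective: faster
-- what changed: A substring-searches every alias in every segment per span; B inverts the matching: it hash-indexes the singleton aliases once and slides windows of each occurring alias length over every segment, looking each window up, so per-span cost no longer scales with the number of aliases.
import Mathlib
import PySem

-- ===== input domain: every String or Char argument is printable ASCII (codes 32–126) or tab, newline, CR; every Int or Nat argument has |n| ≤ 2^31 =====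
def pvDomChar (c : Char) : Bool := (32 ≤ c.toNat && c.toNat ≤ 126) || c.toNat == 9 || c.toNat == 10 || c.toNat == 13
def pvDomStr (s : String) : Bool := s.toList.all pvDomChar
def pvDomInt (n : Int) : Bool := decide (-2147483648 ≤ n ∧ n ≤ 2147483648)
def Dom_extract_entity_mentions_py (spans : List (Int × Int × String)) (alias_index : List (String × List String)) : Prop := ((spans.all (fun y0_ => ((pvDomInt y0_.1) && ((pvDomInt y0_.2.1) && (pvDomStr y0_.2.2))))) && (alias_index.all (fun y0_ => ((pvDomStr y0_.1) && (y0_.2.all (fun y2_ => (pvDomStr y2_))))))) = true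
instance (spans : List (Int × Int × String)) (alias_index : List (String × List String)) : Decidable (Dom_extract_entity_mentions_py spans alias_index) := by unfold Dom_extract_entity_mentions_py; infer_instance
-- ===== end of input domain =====

-- B replaces A's per-span scan over all aliases by window lookup: a hash index of the
-- singleton aliases built once, then every segment window of each alias length looked up
-- (measured faster in a timing run; equality of RETURN values).


-- ===== PORT A =====
-- 'for entity_id in matched' iterates a Python set (hash order); it is ported in insertion
-- order, exact whenever matched holds at most one element — Pre_ below admits exactly those inputs.
def extract_entity_mentions_py (spans : List (Int × Int × String)) (alias_index : List (String × List String)) : List (String × Int × Int) :=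
  spans.foldl (fun mentions sp =>
    let matched : PySem.Set String :=
      alias_index.foldl (fun m kv =>
        if kv.1 = "" ∨ ¬ PySem.Str.isIn kv.1 sp.2.2 then m
        else if kv.2.length = 1 then PySem.Set.update m kv.2 else m) PySem.Set.empty
    mentions ++ matched.map (fun eid => (eid, sp.1, sp.2.1))) []

-- ===== PORT B =====
-- singles = {alias: sole id} for the non-empty singleton aliases (string keys as List Char)
def pvSingles (alias_index : List (String × List String)) : PySem.Dict (List Char) String :=
  alias_index.foldl (fun d kv =>
    if kv.1 ≠ "" ∧ kv.2.length = 1 then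
      match kv.2.head? with
      | some eid => d.insert kv.1.toList eid
      | none => d
    else d) PySem.Dict.empty

-- lengths = sorted({len(a) for a in singles})
def pvLengths (alias_index : List (String × List String)) : List Nat :=
  PySem.List.sorted (PySem.Set.ofList ((pvSingles alias_index).keys.map List.length)) (fun x => x) false

-- found = ordered key set of the per-segment window-lookup dict
def pvFound (singles : PySem.Dict (List Char) String) (lengths : List Nat) (seg : List Char) : List String :=
  (List.range seg.length).foldl (fun found i =>
    lengths.foldl (fun found L =>
      if i + L ≤ seg.length then
        match singles.get? ((seg.drop i).take L) with
        | some eid => if eid ∈ found then found else found ++ [eid]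
        | none => found
      else found) found) []

def extract_entity_mentions_py_alt (spans : List (Int × Int × String)) (alias_index : List (String × List String)) : List (String × Int × Int) :=
  let singles := pvSingles alias_index
  let lengths := pvLengths alias_index
  spans.foldl (fun mentions sp =>
    let found := pvFound singles lengths sp.2.2.toList
    mentions ++ found.map (fun eid => (eid, sp.1, sp.2.1))) []

-- ===== PRECONDITION & SPEC =====
-- Pre_ excludes inputs where some span's segment contains two singleton aliases with distinct
-- entity ids: there A emits those ids in Python's hash-dependent set iteration order, an
-- accident of the implementation no port can reproduce; B uses window-scan order there.
def Pre_extract_entity_mentions_py (spans : List (Int × Int × String)) (alias_index : List (String × List String)) : Prop :=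
  ∀ sp ∈ spans, ∀ kv₁ ∈ alias_index, ∀ kv₂ ∈ alias_index,
    kv₁.1 ≠ "" → kv₂.1 ≠ "" →
    PySem.Str.isIn kv₁.1 sp.2.2 = true → PySem.Str.isIn kv₂.1 sp.2.2 = true →
    kv₁.2.length = 1 → kv₂.2.length = 1 → kv₁.2 = kv₂.2
instance (spans : List (Int × Int × String)) (alias_index : List (String × List String)) : Decidable (Pre_extract_entity_mentions_py spans alias_index) := by unfold Pre_extract_entity_mentions_py; infer_instance

def pvWitness_extract_entity_mentions_py : (List (Int × Int × String)) × (List (String × List String)) :=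
  ([(0, 3, "abc")], [("ab", ["e1"]), ("zz", ["e2"]), ("c", ["e1"])])

def Spec_extract_entity_mentions_py (spans : List (Int × Int × String)) (alias_index : List (String × List String)) (out : List (String × Int × Int)) : Prop := out = extract_entity_mentions_py_alt spans alias_index
instance (spans : List (Int × Int × String)) (alias_index : List (String × List String)) (out : List (String × Int × Int)) : Decidable (Spec_extract_entity_mentions_py spans alias_index out) := by unfold Spec_extract_entity_mentions_py; infer_instance

-- ===== CLAIM (what is proved, stated in full; the proofs are below) =====
def Claim_equal_extract_entity_mentions_py : Prop := ∀ (spans : List (Int × Int × String)) (alias_index : List (String × List String)), Dom_extract_entity_mentions_py spans alias_index → Pre_extract_entity_mentions_py spans alias_index → Spec_extract_entity_mentions_py spans alias_index (extract_entity_mentions_py spans alias_index)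

-- ===== LEMMAS AND PROOFS =====

-- A's per-span id list (alias-scan order, before set dedup)
def pvIds (alias_index : List (String × List String)) (seg : String) : List String :=
  ((alias_index.filterMap (fun kv =>
      if kv.1 ≠ "" ∧ kv.2.length = 1 then kv.2.head?.map (fun eid => (kv.1, eid)) else none)).filter
    (fun p => PySem.Str.isIn p.1 seg)).map (fun p => p.2)

-- A's inner alias loop over any accumulator set equals updating it with pvIds
lemma foldl_step_eq_update (alias_index : List (String × List String)) (seg : String)
    (m : PySem.Set String) :
    alias_index.foldl (fun m kv =>
        if kv.1 = "" ∨ ¬ PySem.Str.isIn kv.1 seg then m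
        else if kv.2.length = 1 then PySem.Set.update m kv.2 else m) m
      = PySem.Set.update m (pvIds alias_index seg) := by
  induction alias_index generalizing m with
  | nil => simp [pvIds, PySem.Set.update]
  | cons kv rest ih =>
    rw [List.foldl_cons]
    by_cases hc : kv.1 = "" ∨ ¬ PySem.Str.isIn kv.1 seg = true
    · rw [if_pos hc, ih]
      have hids : pvIds (kv :: rest) seg = pvIds rest seg := by
        rcases hc with h1 | h2
        · simp [pvIds, h1]
        · simp only [PySem.Str.isIn_eq] at h2
          by_cases h3 : kv.2.length = 1
          · obtain ⟨eid, heid⟩ : ∃ e, kv.2 = [e] := List.length_eq_one_iff.mp h3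
            by_cases h1 : kv.1 = ""
            · simp [pvIds, h1]
            · simp [pvIds, h1, heid, Bool.eq_false_iff.mpr h2]
          · simp [pvIds, h3]
      rw [hids]
    · push Not at hc
      obtain ⟨h1, h2⟩ := hc
      have h2c : PySem.Chars.isIn kv.1.toList seg.toList = true := by
        simpa [PySem.Str.isIn_eq] using h2
      rw [if_neg (by simp [h1, h2c])]
      by_cases h3 : kv.2.length = 1
      · obtain ⟨eid, heid⟩ : ∃ e, kv.2 = [e] := List.length_eq_one_iff.mp h3
        have hids : pvIds (kv :: rest) seg = eid :: pvIds rest seg := by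
          simp [pvIds, h1, heid, h2c]
        rw [if_pos h3, ih, hids, heid, PySem.Set.update_cons, PySem.Set.update_cons,
          PySem.Set.update_nil]
      · have hids : pvIds (kv :: rest) seg = pvIds rest seg := by
          simp [pvIds, h3]
        rw [if_neg h3, ih, hids]

-- A's per-span matched set equals the ordered dedup of pvIds
lemma matched_eq_dedup (alias_index : List (String × List String)) (seg : String) :
    alias_index.foldl (fun m kv =>
        if kv.1 = "" ∨ ¬ PySem.Str.isIn kv.1 seg then m
        else if kv.2.length = 1 then PySem.Set.update m kv.2 else m) PySem.Set.empty
      = PySem.List.dedup (pvIds alias_index seg) := by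
  rw [foldl_step_eq_update, PySem.List.dedup_eq_ofList, ← PySem.Set.update_nil_left]
  rfl

-- membership in pvIds
lemma mem_pvIds {alias_index : List (String × List String)} {seg : String} {e : String} :
    e ∈ pvIds alias_index seg ↔
      ∃ kv ∈ alias_index, kv.1 ≠ "" ∧ kv.2 = [e] ∧ PySem.Str.isIn kv.1 seg = true := by
  constructor
  · rintro h
    simp only [pvIds, List.mem_map, List.mem_filter, List.mem_filterMap] at h
    obtain ⟨p, ⟨⟨kv, hkv, hp⟩, hin⟩, rfl⟩ := h
    split_ifs at hp with hcond
    obtain ⟨eid, heid⟩ : ∃ x, kv.2 = [x] := List.length_eq_one_iff.mp hcond.2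
    simp only [heid, List.head?, Option.map_some] at hp
    obtain rfl := Option.some_inj.mp hp
    exact ⟨kv, hkv, hcond.1, heid, hin⟩
  · rintro ⟨kv, hkv, h1, h2, h3⟩
    simp only [pvIds, List.mem_map, List.mem_filter, List.mem_filterMap]
    exact ⟨(kv.1, e), ⟨⟨kv, hkv, by simp [h1, h2]⟩, h3⟩, rfl⟩

-- the fold building singles: soundness of a successful lookup
lemma singles_fold_some {l : List (String × List String)} {d : PySem.Dict (List Char) String}
    {w : List Char} {e : String}
    (h : (l.foldl (fun d kv =>
        if kv.1 ≠ "" ∧ kv.2.length = 1 then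
          match kv.2.head? with
          | some eid => d.insert kv.1.toList eid
          | none => d
        else d) d).get? w = some e) :
    d.get? w = some e ∨ ∃ kv ∈ l, kv.1.toList = w ∧ kv.1 ≠ "" ∧ kv.2 = [e] := by
  induction l generalizing d with
  | nil => exact Or.inl h
  | cons kv rest ih =>
    rw [List.foldl_cons] at h
    rcases ih h with h' | ⟨kv', hkv', rest'⟩
    · by_cases hc : kv.1 ≠ "" ∧ kv.2.length = 1
      · obtain ⟨eid, heid⟩ : ∃ x, kv.2 = [x] := List.length_eq_one_iff.mp hc.2
        rw [if_pos hc, heid] at h'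
        simp only [List.head?] at h'
        rw [PySem.Dict.get?_insert] at h'
        by_cases hw : w = kv.1.toList
        · rw [if_pos hw] at h'
          exact Or.inr ⟨kv, List.mem_cons_self, hw.symm, hc.1, by rw [heid, Option.some_inj.mp h']⟩
        · rw [if_neg hw] at h'
          exact Or.inl h'
      · rw [if_neg hc] at h'
        exact Or.inl h'
    · exact Or.inr ⟨kv', List.mem_cons_of_mem _ hkv', rest'⟩

-- contains is preserved by the singles fold
lemma singles_fold_contains_mono {l : List (String × List String)} {d : PySem.Dict (List Char) String}
    {w : List Char} (h : d.contains w = true) :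
    (l.foldl (fun d kv =>
        if kv.1 ≠ "" ∧ kv.2.length = 1 then
          match kv.2.head? with
          | some eid => d.insert kv.1.toList eid
          | none => d
        else d) d).contains w = true := by
  induction l generalizing d with
  | nil => exact h
  | cons kv rest ih =>
    rw [List.foldl_cons]
    apply ih
    split_ifs with hc
    · obtain ⟨eid, heid⟩ : ∃ x, kv.2 = [x] := List.length_eq_one_iff.mp hc.2
      rw [heid]
      simp only [List.head?]
      rw [PySem.Dict.contains_insert, h]
      simp
    · exact h

-- completeness: every non-empty singleton alias is a key of singles
lemma singles_fold_complete {l : List (String × List String)} {d : PySem.Dict (List Char) String}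
    {kv : String × List String} {e : String}
    (hkv : kv ∈ l) (h1 : kv.1 ≠ "") (h2 : kv.2 = [e]) :
    (l.foldl (fun d kv =>
        if kv.1 ≠ "" ∧ kv.2.length = 1 then
          match kv.2.head? with
          | some eid => d.insert kv.1.toList eid
          | none => d
        else d) d).contains kv.1.toList = true := by
  induction l generalizing d with
  | nil => cases hkv
  | cons kv' rest ih =>
    rw [List.foldl_cons]
    rcases List.mem_cons.mp hkv with rfl | hmem
    · apply singles_fold_contains_mono
      rw [if_pos ⟨h1, by rw [h2]; rfl⟩, h2]
      simp only [List.head?]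
      exact PySem.Dict.contains_insert_self _ _ _
    · exact ih hmem

-- lookup length of any singles key occurs in pvLengths
lemma length_mem_pvLengths {alias_index : List (String × List String)} {w : List Char} {e : String}
    (h : (pvSingles alias_index).get? w = some e) :
    w.length ∈ pvLengths alias_index := by
  have hc : (pvSingles alias_index).contains w = true := by
    rw [PySem.Dict.contains_eq_isSome_get?, h]; rfl
  have hk : w ∈ (pvSingles alias_index).keys := (PySem.Dict.contains_iff_mem_keys _ _).mp hc
  unfold pvLengths
  rw [PySem.List.mem_sorted, PySem.Set.mem_ofList]
  exact List.mem_map_of_mem hk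

-- one step of the inner loop
lemma mem_step {singles : PySem.Dict (List Char) String} {seg : List Char} {i L : Nat}
    {found : List String} {e : String} :
    e ∈ (if i + L ≤ seg.length then
          match singles.get? ((seg.drop i).take L) with
          | some eid => if eid ∈ found then found else found ++ [eid]
          | none => found
        else found) ↔
      e ∈ found ∨ (i + L ≤ seg.length ∧ singles.get? ((seg.drop i).take L) = some e) := by
  split_ifs with h1
  · cases hg : singles.get? ((seg.drop i).take L) with
    | none => simp [h1]
    | some eid =>
      dsimp only
      simp only [h1, true_and, Option.some_inj]
      split_ifs with h2
      · constructor
        · exact Or.inl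
        · rintro (h | rfl)
          · exact h
          · exact h2
      · rw [List.mem_append]
        simp [eq_comm]
  · simp [h1]

-- membership in the inner (length) loop
lemma mem_inner {singles : PySem.Dict (List Char) String} {seg : List Char} {i : Nat}
    {lengths : List Nat} {found : List String} {e : String} :
    e ∈ lengths.foldl (fun found L =>
        if i + L ≤ seg.length then
          match singles.get? ((seg.drop i).take L) with
          | some eid => if eid ∈ found then found else found ++ [eid]
          | none => found
        else found) found ↔
      e ∈ found ∨ ∃ L ∈ lengths, i + L ≤ seg.length ∧
        singles.get? ((seg.drop i).take L) = some e := by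
  induction lengths generalizing found with
  | nil => simp
  | cons L rest ih =>
    rw [List.foldl_cons, ih]
    constructor
    · rintro (h | ⟨L', hL', h1, h2⟩)
      · rcases mem_step.mp h with h' | ⟨h1, h2⟩
        · exact Or.inl h'
        · exact Or.inr ⟨L, List.mem_cons_self, h1, h2⟩
      · exact Or.inr ⟨L', List.mem_cons_of_mem _ hL', h1, h2⟩
    · rintro (h | ⟨L', hL', h1, h2⟩)
      · exact Or.inl (mem_step.mpr (Or.inl h))
      · rcases List.mem_cons.mp hL' with rfl | hmem
        · exact Or.inl (mem_step.mpr (Or.inr ⟨h1, h2⟩))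
        · exact Or.inr ⟨L', hmem, h1, h2⟩

-- membership in the outer (position) loop
lemma mem_outer {singles : PySem.Dict (List Char) String} {seg : List Char}
    {lengths : List Nat} {is : List Nat} {found : List String} {e : String} :
    e ∈ is.foldl (fun found i =>
        lengths.foldl (fun found L =>
          if i + L ≤ seg.length then
            match singles.get? ((seg.drop i).take L) with
            | some eid => if eid ∈ found then found else found ++ [eid]
            | none => found
          else found) found) found ↔
      e ∈ found ∨ ∃ i ∈ is, ∃ L ∈ lengths, i + L ≤ seg.length ∧
        singles.get? ((seg.drop i).take L) = some e := by
  induction is generalizing found with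
  | nil => simp
  | cons i rest ih =>
    rw [List.foldl_cons, ih, mem_inner]
    constructor
    · rintro ((h | ⟨L, hL, h1, h2⟩) | ⟨i', hi', rest'⟩)
      · exact Or.inl h
      · exact Or.inr ⟨i, List.mem_cons_self, L, hL, h1, h2⟩
      · exact Or.inr ⟨i', List.mem_cons_of_mem _ hi', rest'⟩
    · rintro (h | ⟨i', hi', rest'⟩)
      · exact Or.inl (Or.inl h)
      · rcases List.mem_cons.mp hi' with rfl | hmem
        · exact Or.inl (Or.inr rest')
        · exact Or.inr ⟨i', hmem, rest'⟩

lemma mem_pvFound {alias_index : List (String × List String)} {seg : List Char} {e : String} :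
    e ∈ pvFound (pvSingles alias_index) (pvLengths alias_index) seg ↔
      ∃ i, i < seg.length ∧ ∃ L ∈ pvLengths alias_index, i + L ≤ seg.length ∧
        (pvSingles alias_index).get? ((seg.drop i).take L) = some e := by
  unfold pvFound
  rw [mem_outer]
  simp [List.mem_range]

-- the found accumulator stays duplicate-free
lemma nodup_inner {singles : PySem.Dict (List Char) String} {seg : List Char} {i : Nat}
    {lengths : List Nat} {found : List String} (h : found.Nodup) :
    (lengths.foldl (fun found L =>
        if i + L ≤ seg.length then
          match singles.get? ((seg.drop i).take L) with
          | some eid => if eid ∈ found then found else found ++ [eid]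
          | none => found
        else found) found).Nodup := by
  induction lengths generalizing found with
  | nil => exact h
  | cons L rest ih =>
    rw [List.foldl_cons]
    apply ih
    split_ifs with h1
    · cases hg : singles.get? ((seg.drop i).take L) with
      | none => exact h
      | some eid =>
        dsimp only
        split_ifs with h2
        · exact h
        · simp [List.nodup_append, h]
          exact fun a ha' he => h2 (he ▸ ha')
    · exact h

lemma nodup_pvFound {singles : PySem.Dict (List Char) String} {lengths : List Nat}
    {seg : List Char} : (pvFound singles lengths seg).Nodup := by
  unfold pvFound
  generalize (List.range seg.length) = is
  have : ∀ (found : List String), found.Nodup →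
      (is.foldl (fun found i =>
        lengths.foldl (fun found L =>
          if i + L ≤ seg.length then
            match singles.get? ((seg.drop i).take L) with
            | some eid => if eid ∈ found then found else found ++ [eid]
            | none => found
          else found) found) found).Nodup := by
    induction is with
    | nil => intro found h; exact h
    | cons i rest ih => intro found h; rw [List.foldl_cons]; exact ih _ (nodup_inner h)
  exact this [] List.nodup_nil

-- a window is an infix and conversely
lemma infix_of_window {a s : List Char} {i L : Nat} (h : (s.drop i).take L = a) :
    a <:+: s := by
  have h1 : a <+: s.drop i := h ▸ List.take_prefix L (s.drop i)
  exact h1.isInfix.trans (List.drop_suffix i s).isInfix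

lemma window_of_infix {a s : List Char} (h : a <:+: s) :
    ∃ i, i + a.length ≤ s.length ∧ (s.drop i).take a.length = a := by
  obtain ⟨u, v, huv⟩ := h
  refine ⟨u.length, ?_, ?_⟩
  · have := congrArg List.length huv
    simp at this
    omega
  · have : s.drop u.length = a ++ v := by
      rw [← huv, List.append_assoc, List.drop_left]
    rw [this, List.take_left]

-- two duplicate-free lists with equal membership all of whose elements coincide are equal
lemma eq_of_nodup_of_mem_iff {l₁ l₂ : List String} (h₁ : l₁.Nodup) (h₂ : l₂.Nodup)
    (hm : ∀ x, x ∈ l₁ ↔ x ∈ l₂) (ha : ∀ x ∈ l₁, ∀ y ∈ l₁, x = y) : l₁ = l₂ := by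
  cases l₁ with
  | nil =>
    cases l₂ with
    | nil => rfl
    | cons b t => exact absurd ((hm b).mpr List.mem_cons_self) (by simp)
  | cons a t =>
    have ht : t = [] := by
      by_contra hne
      obtain ⟨x, hx⟩ := List.exists_mem_of_ne_nil t hne
      have hxa : x = a := ha x (List.mem_cons_of_mem _ hx) a List.mem_cons_self
      rw [List.nodup_cons] at h₁
      exact h₁.1 (hxa ▸ hx)
    subst ht
    have ha2 : a ∈ l₂ := (hm a).mp List.mem_cons_self
    cases l₂ with
    | nil => cases ha2
    | cons b t₂ =>
      have hb : b = a := ha b ((hm b).mpr List.mem_cons_self) a (by simp)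
      subst hb
      have ht₂ : t₂ = [] := by
        by_contra hne
        obtain ⟨y, hy⟩ := List.exists_mem_of_ne_nil t₂ hne
        have hy1 : y ∈ [b] := (hm y).mpr (List.mem_cons_of_mem _ hy)
        simp only [List.mem_singleton] at hy1
        rw [List.nodup_cons] at h₂
        exact h₂.1 (hy1 ▸ hy)
      rw [ht₂]

-- per-span equality of A's matched list and B's found list, under the span's Pre_ clause
lemma span_eq (alias_index : List (String × List String)) (seg : String)
    (hpre : ∀ kv₁ ∈ alias_index, ∀ kv₂ ∈ alias_index,
      kv₁.1 ≠ "" → kv₂.1 ≠ "" →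
      PySem.Str.isIn kv₁.1 seg = true → PySem.Str.isIn kv₂.1 seg = true →
      kv₁.2.length = 1 → kv₂.2.length = 1 → kv₁.2 = kv₂.2) :
    PySem.List.dedup (pvIds alias_index seg)
      = pvFound (pvSingles alias_index) (pvLengths alias_index) seg.toList := by
  -- every element produced by B's window lookup is one of A's ids
  have hBA : ∀ e, e ∈ pvFound (pvSingles alias_index) (pvLengths alias_index) seg.toList →
      e ∈ pvIds alias_index seg := by
    intro e he
    obtain ⟨i, _, L, _, _, hget⟩ := mem_pvFound.mp he
    rcases singles_fold_some hget with h0 | ⟨kv, hkv, hw, h1, h2⟩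
    · simp [PySem.Dict.get?_empty] at h0
    · refine mem_pvIds.mpr ⟨kv, hkv, h1, h2, ?_⟩
      rw [PySem.Str.isIn_iff_infix, hw]
      exact infix_of_window rfl
  -- and conversely, under Pre_
  have hAB : ∀ e, e ∈ pvIds alias_index seg →
      e ∈ pvFound (pvSingles alias_index) (pvLengths alias_index) seg.toList := by
    intro e he
    obtain ⟨kv, hkv, h1, h2, h3⟩ := mem_pvIds.mp he
    obtain ⟨i, hile, hwin⟩ := window_of_infix ((PySem.Str.isIn_iff_infix _ _).mp h3)
    have hcont : (pvSingles alias_index).contains kv.1.toList = true :=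
      singles_fold_complete hkv h1 h2
    obtain ⟨e', hget⟩ : ∃ e', (pvSingles alias_index).get? kv.1.toList = some e' := by
      rw [PySem.Dict.contains_eq_isSome_get?] at hcont
      exact Option.isSome_iff_exists.mp hcont
    have hLpos : 0 < kv.1.toList.length := by
      rcases Nat.eq_zero_or_pos kv.1.toList.length with h0 | h0
      · exact absurd (String.toList_eq_nil_iff.mp (List.length_eq_zero_iff.mp h0)) h1
      · exact h0
    have he' : e' ∈ pvFound (pvSingles alias_index) (pvLengths alias_index) seg.toList := by
      refine mem_pvFound.mpr ⟨i, by omega, kv.1.toList.length, length_mem_pvLengths hget,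
        hile, ?_⟩
      rw [hwin]
      exact hget
    -- e' comes from some entry with the same key text, so Pre_ forces e' = e
    rcases singles_fold_some hget with h0 | ⟨kv', hkv', hw', h1', h2'⟩
    · simp [PySem.Dict.get?_empty] at h0
    · have hin' : PySem.Str.isIn kv'.1 seg = true := by
        rw [PySem.Str.isIn_iff_infix, hw']
        exact (PySem.Str.isIn_iff_infix _ _).mp h3
      have := hpre kv' hkv' kv hkv h1' h1 hin' h3 (by rw [h2']; rfl) (by rw [h2]; rfl)
      rw [h2, h2'] at this
      rw [List.singleton_inj.mp this] at he'
      exact he'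
  refine eq_of_nodup_of_mem_iff (PySem.List.nodup_dedup _) nodup_pvFound ?_ ?_
  · intro x
    rw [PySem.List.mem_dedup]
    exact ⟨hAB x, hBA x⟩
  · intro x hx y hy
    rw [PySem.List.mem_dedup] at hx hy
    obtain ⟨kvx, hkvx, hx1, hx2, hx3⟩ := mem_pvIds.mp hx
    obtain ⟨kvy, hkvy, hy1, hy2, hy3⟩ := mem_pvIds.mp hy
    have := hpre kvx hkvx kvy hkvy hx1 hy1 hx3 hy3 (by rw [hx2]; rfl) (by rw [hy2]; rfl)
    rw [hx2, hy2] at this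
    exact List.singleton_inj.mp this

lemma main_eq (spans : List (Int × Int × String)) (alias_index : List (String × List String))
    (hpre : Pre_extract_entity_mentions_py spans alias_index) :
    extract_entity_mentions_py spans alias_index
      = extract_entity_mentions_py_alt spans alias_index := by
  unfold extract_entity_mentions_py extract_entity_mentions_py_alt
  dsimp only
  have : ∀ (sps : List (Int × Int × String)) (acc : List (String × Int × Int)),
      (∀ sp ∈ sps, sp ∈ spans) →
      sps.foldl (fun mentions sp =>
        mentions ++ (alias_index.foldl (fun m kv =>
          if kv.1 = "" ∨ ¬ PySem.Str.isIn kv.1 sp.2.2 then m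
          else if kv.2.length = 1 then PySem.Set.update m kv.2 else m) PySem.Set.empty).map
            (fun eid => (eid, sp.1, sp.2.1))) acc
      = sps.foldl (fun mentions sp =>
        mentions ++ (pvFound (pvSingles alias_index) (pvLengths alias_index) sp.2.2.toList).map
            (fun eid => (eid, sp.1, sp.2.1))) acc := by
    intro sps
    induction sps with
    | nil => intro acc _; rfl
    | cons sp rest ih =>
      intro acc hsub
      rw [List.foldl_cons, List.foldl_cons]
      rw [matched_eq_dedup alias_index sp.2.2,
        span_eq alias_index sp.2.2 (hpre sp (hsub sp List.mem_cons_self))]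
      exact ih _ (fun x hx => hsub x (List.mem_cons_of_mem _ hx))
  exact this spans [] (fun _ h => h)

-- ===== VERDICT (by name: the statement is the Claim_ definition above) =====
theorem extract_entity_mentions_py_spec : Claim_equal_extract_entity_mentions_py := by
  intro spans alias_index _ hpre
  exact main_eq spans alias_index hpre
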